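-- pv_equiv track=rewrite | github.com/AdamZhouSE/pythonHomework | Code/CodeRecords/2969/60797/295665.py | isLyndon
-- ===== SOURCE A (Python) =====
-- def isLyndon(s):
--     re = s
--     tmp = s
--     for i in range(len(s)):
--         tmp = tmp[1:]+tmp[0]
--         re = min(re, tmp)
--     if re==s:
--         return True
--     return False
-- ===== SOURCE B (Python) =====
-- def isLyndon(s):
--     # Booth-style least-rotation check: challenge rotation 0 with candidate start j,
--     # compare until first mismatch at offset k, then skip j..j+k (classic skip lemma).
--     # O(n): each outer round costs k+1 comparisons and advances j by k+1.
--     n = len(s)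
--     j = 1
--     while j < n:
--         k = 0
--         while k < n and s[k] == s[(j + k) % n]:
--             k += 1
--         if k == n:
--             return True
--         if s[(j + k) % n] < s[k]:
--             return False
--         j += k + 1
--     return True
-- ===== Notes on version B (the rewrite author's own statement) =====
-- stated objective: faster
-- what changed: A builds all n rotations keeping a running min and tests min==s (O(n^2)); B is a Booth-style two-pointer scan that challenges rotation 0 with candidate starts j, skipping j..j+k after a mismatch at offset k, so it never builds a rotation and runs in O(n).
import Mathlib
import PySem

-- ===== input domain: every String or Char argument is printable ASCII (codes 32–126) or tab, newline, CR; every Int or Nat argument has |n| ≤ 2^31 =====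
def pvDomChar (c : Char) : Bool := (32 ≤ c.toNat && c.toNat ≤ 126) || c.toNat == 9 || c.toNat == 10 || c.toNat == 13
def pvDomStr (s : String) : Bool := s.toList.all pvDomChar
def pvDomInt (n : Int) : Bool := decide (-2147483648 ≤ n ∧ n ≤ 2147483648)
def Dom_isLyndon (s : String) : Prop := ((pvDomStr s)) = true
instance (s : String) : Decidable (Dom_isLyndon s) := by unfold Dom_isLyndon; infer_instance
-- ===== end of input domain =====

-- B replaces A's "build every rotation, keep the running min" fold by a Booth-style two-pointer
-- scan that challenges rotation 0 with candidate starts j and skips j..j+k after a mismatch at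
-- offset k (objective: faster, O(n) instead of O(n^2)).


-- ===== PORT A =====
-- one loop step: tmp = tmp[1:] + tmp[0]; re = min(re, tmp) (state = (re, tmp)).
-- tmp[0] via pyGet?; the `none` branch (Python's IndexError) is unreachable since tmp is never
-- empty when the loop runs, the empty-list default only makes the step total.
def pvStepA (p : List Char × List Char) : List Char × List Char :=
  let tmp := PySem.List.slice p.2 (some 1) none ++
             (match PySem.List.pyGet? p.2 0 with | some c => [c] | none => [])
  (if tmp < p.1 then tmp else p.1, tmp)

def isLyndon (s : String) : Bool :=
  let l := s.toList
  let st := (PySem.List.pyRange 0 (l.length : Int)).foldl (fun p _ => pvStepA p) (l, l)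
  decide (st.1 = l)

-- ===== PORT B =====
-- inner while loop: first k' ≥ k with k' = n or s[k'] ≠ s[(j+k') % n].
-- Python indexes s[k] / s[(j+k)%n] are always in range here, so getD is exact.
def pvScan (l : List Char) (j : Nat) (k : Nat) : Nat :=
  if _h : k < l.length then
    if l.getD k ' ' = l.getD ((j + k) % l.length) ' ' then pvScan l j (k + 1) else k
  else k
termination_by l.length - k

-- outer while loop over candidate starts j
def pvLoop (l : List Char) (j : Nat) : Bool :=
  if _h : j < l.length then
    let k := pvScan l j 0
    if k = l.length then true
    else if l.getD ((j + k) % l.length) ' ' < l.getD k ' ' then false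
    else pvLoop l (j + k + 1)
  else true
termination_by l.length - j

def isLyndon_alt (s : String) : Bool := pvLoop s.toList 1

-- ===== PRECONDITION & SPEC =====
def Spec_isLyndon (s : String) (out : Bool) : Prop := out = isLyndon_alt s
instance (s : String) (out : Bool) : Decidable (Spec_isLyndon s out) := by unfold Spec_isLyndon; infer_instance

-- ===== CLAIM (what is proved, stated in full; the proofs are below) =====
def Claim_equal_isLyndon : Prop := ∀ (s : String), Dom_isLyndon s → Spec_isLyndon s (isLyndon s)

-- ===== LEMMAS AND PROOFS =====

-- ---- A side: characterise the rotate-and-min fold ----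

-- one A-step sends (re, l.rotate k) to (min re (l.rotate (k+1)), l.rotate (k+1))
theorem pvStepA_rotate (l : List Char) (re : List Char) (k : Nat) :
    pvStepA (re, l.rotate k) =
      (if l.rotate (k+1) < re then l.rotate (k+1) else re, l.rotate (k+1)) := by
  have htmp : PySem.List.slice (l.rotate k) (some 1) none ++
      (match PySem.List.pyGet? (l.rotate k) 0 with | some c => [c] | none => []) =
      l.rotate (k+1) := by
    rw [← List.rotate_rotate l k 1]
    cases h : l.rotate k with
    | nil => simp [PySem.List.slice_from_one, PySem.List.pyGet?, PySem.List.pyIdx?]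
    | cons c cs =>
        simp [PySem.List.slice_from_one, PySem.List.pyGet?, PySem.List.pyIdx?, List.rotate_cons_succ,
          List.rotate_zero]
  simp only [pvStepA, htmp]

-- invariant of A's fold after m steps
theorem pvInvA (l : List Char) (m : Nat) :
    ((PySem.List.pyRange 0 (m : Int)).foldl (fun p _ => pvStepA p) (l, l)).2 = l.rotate m ∧
    (((PySem.List.pyRange 0 (m : Int)).foldl (fun p _ => pvStepA p) (l, l)).1 = l ↔
        ∀ k < m, ¬ l.rotate (k+1) < l) ∧
    (((PySem.List.pyRange 0 (m : Int)).foldl (fun p _ => pvStepA p) (l, l)).1 = l ∨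
        ((PySem.List.pyRange 0 (m : Int)).foldl (fun p _ => pvStepA p) (l, l)).1 < l) := by
  induction m with
  | zero =>
      simp [PySem.List.pyRange]
  | succ m ih =>
      have hr : PySem.List.pyRange 0 ((m : Int) + 1) = PySem.List.pyRange 0 (m : Int) ++ [(m : Int)] :=
        PySem.List.pyRange_one_succ_right (by exact_mod_cast Nat.zero_le m)
      obtain ⟨h2, hiff, hle⟩ := ih
      set p := (PySem.List.pyRange 0 (m : Int)).foldl (fun p _ => pvStepA p) (l, l) with hp
      have hfold : (PySem.List.pyRange 0 ((m : Nat) + 1 : Int)).foldl (fun p _ => pvStepA p) (l, l)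
          = pvStepA p := by
        rw [hr, List.foldl_append, ← hp]
        rfl
      have hstep : pvStepA p =
          (if l.rotate (m+1) < p.1 then l.rotate (m+1) else p.1, l.rotate (m+1)) := by
        have := pvStepA_rotate l p.1 m
        rw [← h2] at this
        simpa using this
      push_cast
      rw [hfold, hstep]
      refine ⟨rfl, ?_, ?_⟩
      · constructor
        · intro h k hk
          by_cases hc : l.rotate (m+1) < p.1
          · simp only [if_pos hc] at h
            rcases hle with h1 | h1
            · rw [h1] at hc; rw [h] at hc; exact absurd hc (lt_irrefl _)
            · rw [h] at hc
              exact absurd (lt_trans hc h1) (lt_irrefl _)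
          · simp only [if_neg hc] at h
            rcases Nat.lt_succ_iff_lt_or_eq.mp hk with hk' | hk'
            · exact (hiff.mp h) k hk'
            · subst hk'; rw [h] at hc; exact hc
        · intro h
          have hml : ¬ l.rotate (m+1) < l := h m (Nat.lt_succ_self m)
          have hpl : p.1 = l := hiff.mpr (fun k hk => h k (Nat.lt_succ_of_lt hk))
          rw [hpl, if_neg hml]
      · by_cases hc : l.rotate (m+1) < p.1
        · simp only [if_pos hc]
          rcases hle with h1 | h1
          · rw [h1] at hc; exact Or.inr hc
          · exact Or.inr (lt_trans hc h1)
        · simp only [if_neg hc]; exact hle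

-- ---- generic bridges: getD on rotations, lexicographic order from pointwise chars ----

theorem pvRotGetD (l : List Char) (j m : Nat) (hm : m < l.length) :
    (l.rotate j).getD m ' ' = l.getD ((j + m) % l.length) ' ' := by
  have h1 : m < (l.rotate j).length := by rwa [List.length_rotate]
  have h2 : (j + m) % l.length < l.length := Nat.mod_lt _ (by omega)
  rw [List.getD_eq_getElem _ _ h1, List.getD_eq_getElem _ _ h2, List.getElem_rotate]
  congr 1
  rw [Nat.add_comm]

theorem pvLtOfPrefixLt : ∀ (k : Nat) (x y : List Char), x.length = y.length → k < x.length →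
    (∀ m, m < k → x.getD m ' ' = y.getD m ' ') → x.getD k ' ' < y.getD k ' ' → x < y := by
  intro k
  induction k with
  | zero =>
      intro x y hlen hk hpre hlt
      cases x with
      | nil => simp at hk
      | cons a xs =>
        cases y with
        | nil => simp at hlen
        | cons b ys =>
          simp only [List.getD_cons_zero] at hlt
          exact List.cons_lt_cons_iff.mpr (Or.inl hlt)
  | succ k ih =>
      intro x y hlen hk hpre hlt
      cases x with
      | nil => simp at hk
      | cons a xs =>
        cases y with
        | nil => simp at hlen
        | cons b ys =>
          have hab : a = b := by simpa using hpre 0 (Nat.succ_pos k)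
          subst hab
          refine List.cons_lt_cons_iff.mpr (Or.inr ⟨rfl, ?_⟩)
          refine ih xs ys (by simpa using hlen) (by simpa using hk) ?_ (by simpa using hlt)
          intro m hm
          simpa using hpre (m+1) (by omega)

theorem pvEqOfGetD (x y : List Char) (hlen : x.length = y.length)
    (h : ∀ m, m < x.length → x.getD m ' ' = y.getD m ' ') : x = y := by
  apply List.ext_getElem hlen
  intro i h1 h2
  have := h i h1
  rwa [List.getD_eq_getElem _ _ h1, List.getD_eq_getElem _ _ h2] at this

-- ---- pvScan: specification of the inner while loop ----

theorem pvScan_spec (l : List Char) (j : Nat) (k : Nat) (hk : k ≤ l.length) :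
    k ≤ pvScan l j k ∧ pvScan l j k ≤ l.length ∧
    (∀ m, k ≤ m → m < pvScan l j k → l.getD m ' ' = l.getD ((j + m) % l.length) ' ') ∧
    (pvScan l j k < l.length →
      l.getD (pvScan l j k) ' ' ≠ l.getD ((j + pvScan l j k) % l.length) ' ') := by
  have hfuel : ∀ f k, l.length - k ≤ f → k ≤ l.length →
      k ≤ pvScan l j k ∧ pvScan l j k ≤ l.length ∧
      (∀ m, k ≤ m → m < pvScan l j k → l.getD m ' ' = l.getD ((j + m) % l.length) ' ') ∧
      (pvScan l j k < l.length →
        l.getD (pvScan l j k) ' ' ≠ l.getD ((j + pvScan l j k) % l.length) ' ') := by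
    intro f
    induction f with
    | zero =>
        intro k hf hk
        have hk' : ¬ k < l.length := by omega
        rw [pvScan, dif_neg hk']
        exact ⟨le_rfl, hk, by intro m hm1 hm2; omega, by intro h; exact absurd h hk'⟩
    | succ f ihf =>
        intro k hf hk
        rw [pvScan]
        by_cases h1 : k < l.length
        · rw [dif_pos h1]
          by_cases h2 : l.getD k ' ' = l.getD ((j + k) % l.length) ' '
          · rw [if_pos h2]
            obtain ⟨ha, hb, hc, hd⟩ := ihf (k+1) (by omega) (by omega)
            refine ⟨by omega, hb, ?_, hd⟩
            intro m hm1 hm2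
            rcases Nat.eq_or_lt_of_le hm1 with hm | hm
            · rw [← hm]; exact h2
            · exact hc m hm hm2
          · rw [if_neg h2]
            exact ⟨le_rfl, le_of_lt h1, by intro m hm1 hm2; omega, fun _ => h2⟩
        · rw [dif_neg h1]
          exact ⟨le_rfl, hk, by intro m hm1 hm2; omega, by intro h; exact absurd h h1⟩
  exact hfuel (l.length - k) k le_rfl hk

-- ---- the skip lemma: after a mismatch at k where rotation 0 is smaller, rotations j..j+k lose ----

theorem pvSkip (l : List Char) (j k : Nat) (hk : k < l.length)
    (hmatch : ∀ m, m < k → l.getD m ' ' = l.getD ((j + m) % l.length) ' ')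
    (hlt : l.getD k ' ' < l.getD ((j + k) % l.length) ' ') :
    ∀ m, m ≤ k → l.rotate m < l.rotate (j + m) := by
  intro m hm
  apply pvLtOfPrefixLt (k - m) (l.rotate m) (l.rotate (j + m)) (by simp)
    (by rw [List.length_rotate]; omega)
  · intro p hp
    rw [pvRotGetD l m p (by omega), pvRotGetD l (j + m) p (by omega)]
    rw [Nat.mod_eq_of_lt (show m + p < l.length by omega)]
    rw [show j + m + p = j + (m + p) from by omega]
    exact hmatch (m + p) (by omega)
  · rw [pvRotGetD l m (k - m) (by omega), pvRotGetD l (j + m) (k - m) (by omega)]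
    rw [show m + (k - m) = k from by omega, show j + m + (k - m) = j + k from by omega]
    rw [Nat.mod_eq_of_lt hk]
    exact hlt

theorem pvGoodExt (l : List Char) (j k : Nat) (hj : 1 ≤ j) (hk : k < l.length)
    (hgood : ∀ i, 1 ≤ i → i < j → ¬ l.rotate i < l)
    (hmatch : ∀ m, m < k → l.getD m ' ' = l.getD ((j + m) % l.length) ' ')
    (hlt : l.getD k ' ' < l.getD ((j + k) % l.length) ' ') :
    ∀ i, 1 ≤ i → i < j + k + 1 → ¬ l.rotate i < l := by
  intro i
  induction i using Nat.strong_induction_on with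
  | _ i ih =>
    intro h1 hi
    by_cases hij : i < j
    · exact hgood i h1 hij
    · have hrot : l.rotate (i - j) < l.rotate i := by
        have := pvSkip l j k hk hmatch hlt (i - j) (by omega)
        rwa [show j + (i - j) = i from by omega] at this
      by_cases h0 : i - j = 0
      · rw [h0, List.rotate_zero] at hrot
        exact fun hc => lt_irrefl l (lt_trans hrot hc)
      · intro hc
        exact ih (i - j) (by omega) (by omega) (by omega) (lt_trans hrot hc)

-- ---- full match: l has cyclic period j, every later rotation repeats an earlier one ----

theorem pvFullMatch (l : List Char) (j : Nat) (hj : 1 ≤ j)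
    (hgood : ∀ i, 1 ≤ i → i < j → ¬ l.rotate i < l)
    (hmatch : ∀ m, m < l.length → l.getD m ' ' = l.getD ((j + m) % l.length) ' ') :
    ∀ i, 1 ≤ i → i < l.length → ¬ l.rotate i < l := by
  have hper : l.rotate j = l := by
    refine (pvEqOfGetD l (l.rotate j) (by simp) ?_).symm
    intro m hm
    rw [pvRotGetD l j m hm]
    exact hmatch m hm
  intro i
  induction i using Nat.strong_induction_on with
  | _ i ih =>
    intro h1 hi
    by_cases hij : i < j
    · exact hgood i h1 hij
    · have hrot : l.rotate i = l.rotate (i - j) := by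
        conv_lhs => rw [show i = j + (i - j) from by omega]
        rw [← List.rotate_rotate, hper]
      rw [hrot]
      by_cases h0 : i - j = 0
      · rw [h0, List.rotate_zero]
        exact lt_irrefl l
      · exact ih (i - j) (by omega) (by omega) (by omega)

-- ---- the outer loop ----

theorem pvLoop_spec (l : List Char) : ∀ j, 1 ≤ j →
    (∀ i, 1 ≤ i → i < j → ¬ l.rotate i < l) →
    (pvLoop l j = true ↔ ∀ i, 1 ≤ i → i < l.length → ¬ l.rotate i < l) := by
  have hfuel : ∀ f j, l.length - j ≤ f → 1 ≤ j →
      (∀ i, 1 ≤ i → i < j → ¬ l.rotate i < l) →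
      (pvLoop l j = true ↔ ∀ i, 1 ≤ i → i < l.length → ¬ l.rotate i < l) := by
    intro f
    induction f with
    | zero =>
        intro j hf h1 hgood
        rw [pvLoop, dif_neg (by omega : ¬ j < l.length)]
        constructor
        · intro _ i hi1 hi2
          exact hgood i hi1 (by omega)
        · intro _; rfl
    | succ f ihf =>
        intro j hf h1 hgood
        by_cases hjn : j < l.length
        · rw [pvLoop, dif_pos hjn]
          obtain ⟨hk0, hkle, hmatch, hstop⟩ := pvScan_spec l j 0 (Nat.zero_le _)
          set K := pvScan l j 0 with hK
          simp only []
          by_cases hKn : K = l.length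
          · rw [if_pos hKn]
            constructor
            · intro _
              exact pvFullMatch l j h1 hgood (fun m hm => hmatch m (Nat.zero_le m) (by omega))
            · intro _; rfl
          · have hKlt : K < l.length := lt_of_le_of_ne hkle hKn
            rw [if_neg hKn]
            by_cases hcmp : l.getD ((j + K) % l.length) ' ' < l.getD K ' '
            · rw [if_pos hcmp]
              simp only [Bool.false_eq_true, false_iff, not_forall]
              refine ⟨j, h1, hjn, ?_⟩
              simp only [not_not]
              apply pvLtOfPrefixLt K (l.rotate j) l (by simp)
                (by rw [List.length_rotate]; exact hKlt)
              · intro m hm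
                rw [pvRotGetD l j m (by omega)]
                exact (hmatch m (Nat.zero_le m) hm).symm
              · rw [pvRotGetD l j K hKlt]
                exact hcmp
            · rw [if_neg hcmp]
              have hlt : l.getD K ' ' < l.getD ((j + K) % l.length) ' ' :=
                lt_of_le_of_ne (le_of_not_gt hcmp) (hstop hKlt)
              exact ihf (j + K + 1) (by omega) (by omega)
                (pvGoodExt l j K h1 hKlt hgood (fun m hm => hmatch m (Nat.zero_le m) hm) hlt)
        · rw [pvLoop, dif_neg hjn]
          constructor
          · intro _ i hi1 hi2
            exact hgood i hi1 (by omega)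
          · intro _; rfl
  exact fun j h1 hg => hfuel (l.length - j) j le_rfl h1 hg

-- ===== VERDICT (by name: the statement is the Claim_ definition above) =====
theorem isLyndon_spec : Claim_equal_isLyndon := by
  intro s _
  unfold Spec_isLyndon isLyndon isLyndon_alt
  set l := s.toList with hl
  obtain ⟨h2, hiff, hle⟩ := pvInvA l l.length
  simp only []
  rw [Bool.eq_iff_iff, decide_eq_true_iff, hiff,
    pvLoop_spec l 1 le_rfl (by intro i h1 h2; omega)]
  constructor
  · intro h i h1 hi
    obtain ⟨k, rfl⟩ := Nat.exists_eq_add_of_le h1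
    simpa [Nat.add_comm] using h k (by omega)
  · intro h k hk
    rcases Nat.lt_or_ge (k+1) l.length with hk' | hk'
    · exact h (k+1) (by omega) hk'
    · have : k + 1 = l.length := by omega
      rw [this, List.rotate_length]
      exact lt_irrefl l
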